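-- pv_equiv track=rewrite | github.com/Ashlett/advent_of_code | 2023/11/lib.py | expand_universe
-- ===== SOURCE A (Python) =====
-- def expand_universe(input_text: str, expansion_factor: int = 2) -> str:
--     expanded_rows = []
--
--     for line in input_text.splitlines():
--         if all([char == "." for char in line]):
--             for _ in range(expansion_factor - 1):
--                 expanded_rows.append(line)
--         expanded_rows.append(line)
--
--     columns_to_expand = []
--     for col_num in range(len(expanded_rows[0])):
--         if all([line[col_num] == "." for line in expanded_rows]):
--             columns_to_expand.append(col_num)
--
--     expanded_rows_and_columns = []
--     for line in expanded_rows: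
--         expanded_line = ""
--         for i, char in enumerate(line):
--             if i in columns_to_expand:
--                 expanded_line += "." * (expansion_factor - 1)
--             expanded_line += char
--         expanded_rows_and_columns.append(expanded_line)
--
--     return "\n".join(expanded_rows_and_columns) + "\n"
-- ===== SOURCE B (Python) =====
-- def expand_universe(input_text: str, expansion_factor: int = 2) -> str:
--     def expand(lines):
--         out = []
--         for line in lines:
--             if all(c == "." for c in line):
--                 out.extend([line] * max(1, expansion_factor))
--             else:
--                 out.append(line)
--         return out
--
--     rows = expand(input_text.splitlines())
--     width = len(rows[0])
--     cols = expand(["".join(row[c] for row in rows) for c in range(width)])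
--     height = len(rows)
--     return "\n".join("".join(col[r] for col in cols) for r in range(height)) + "\n"
-- ===== Notes on version B (the rewrite author's own statement) =====
-- stated objective: idiomatic
-- what changed: B replaces A's three separate passes (row-expansion loop, column-scan building an index list, and a per-character rebuild consulting that list) by one reusable all-dot-line expansion helper applied to the rows and then to the transposed grid, transposing back at the end.
-- outside the precondition, e.g. on expand_universe('ab\nabc', 2): A returns 'ab\nabc\n', B returns 'ab\nab\n'
import Mathlib
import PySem

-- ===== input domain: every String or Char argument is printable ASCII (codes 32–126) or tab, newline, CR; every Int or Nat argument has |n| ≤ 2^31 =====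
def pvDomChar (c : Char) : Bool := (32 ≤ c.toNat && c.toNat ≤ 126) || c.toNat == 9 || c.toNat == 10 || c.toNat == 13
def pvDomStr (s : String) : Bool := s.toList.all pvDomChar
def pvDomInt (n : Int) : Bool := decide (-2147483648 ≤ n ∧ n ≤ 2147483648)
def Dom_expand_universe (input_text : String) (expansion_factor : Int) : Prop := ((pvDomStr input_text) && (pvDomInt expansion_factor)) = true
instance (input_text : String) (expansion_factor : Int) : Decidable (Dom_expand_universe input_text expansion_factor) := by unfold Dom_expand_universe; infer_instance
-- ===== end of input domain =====

-- B reuses one all-dot-line expansion helper on the rows and again on the transposed grid instead of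
-- A's separate column-index scan and per-character rebuild (objective: idiomatic decomposition).
-- B reuses one all-dot-line expansion helper on the rows and again on the transposed grid instead of
-- A's separate column-index scan and per-character rebuild (objective: idiomatic decomposition).

-- ===== PORT A =====
def expand_universe (input_text : String) (expansion_factor : Int) : String :=
  let lines := PySem.Chars.splitlines input_text.toList
  let expanded_rows := lines.foldl (fun acc line =>
    (if line.all (fun c => c == '.') then
        (PySem.List.pyRange 0 (expansion_factor - 1) 1).foldl (fun a _ => a ++ [line]) acc
      else acc) ++ [line]) []
  -- expanded_rows[0]: Python raises IndexError when expanded_rows = []; Pre_ excludes that input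
  let cols := (PySem.List.pyRange 0 (PySem.List.len (PySem.List.pyGetD expanded_rows 0 [])) 1).foldl
    (fun acc c =>
      -- line[col_num]: Python raises IndexError on a line shorter than the first; Pre_ excludes ragged grids
      if expanded_rows.all (fun line => PySem.List.pyGet? line c == some '.') then acc ++ [c]
      else acc) []
  let out := expanded_rows.foldl (fun acc line =>
    acc ++ [(PySem.List.enumerate line 0).foldl (fun el p =>
      (if cols.contains p.1 then el ++ List.replicate (expansion_factor - 1).toNat '.' else el)
        ++ [p.2]) []]) []
  String.mk (PySem.Chars.join ['\n'] out ++ ['\n'])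

-- ===== PORT B =====
-- Source B's helper expand(lines): every all-'.' line repeated max(1, expansion_factor) times
def duExpand (n : Nat) (ls : List (List Char)) : List (List Char) :=
  ls.flatMap (fun l => if l.all (fun c => c == '.') then List.replicate n l else [l])

def expand_universe_alt (input_text : String) (expansion_factor : Int) : String :=
  let n := (max 1 expansion_factor).toNat
  let rows := duExpand n (PySem.Chars.splitlines input_text.toList)
  -- rows[0] / row[c]: raise outside Pre_ (empty or ragged grid); getD defaults are unreachable under Pre_
  let width := (rows.headD []).length
  let cols := duExpand n ((List.range width).map (fun c => rows.map (fun row => row.getD c ' ')))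
  let height := rows.length
  String.mk (PySem.Chars.join ['\n']
    ((List.range height).map (fun r => cols.map (fun col => col.getD r ' '))) ++ ['\n'])

-- ===== PRECONDITION & SPEC =====
-- Pre_ excludes empty input (A raises IndexError on expanded_rows[0]) and ragged grids: on a line
-- shorter than the first A raises IndexError, and on lines longer than the first A silently leaves the
-- overhang characters unexpanded — an accident of its per-index column scan that no caller of this
-- grid function would specify; B's transpose is defined for rectangular grids.
def Pre_expand_universe (input_text : String) (expansion_factor : Int) : Prop :=
  let lines := PySem.Chars.splitlines input_text.toList
  lines ≠ [] ∧ ∀ l ∈ lines, l.length = (lines.headD []).length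
instance (input_text : String) (expansion_factor : Int) : Decidable (Pre_expand_universe input_text expansion_factor) := by unfold Pre_expand_universe; infer_instance

def pvWitness_expand_universe : String × Int := ("#.\n..", 2)

def Spec_expand_universe (input_text : String) (expansion_factor : Int) (out : String) : Prop := out = expand_universe_alt input_text expansion_factor
instance (input_text : String) (expansion_factor : Int) (out : String) : Decidable (Spec_expand_universe input_text expansion_factor out) := by unfold Spec_expand_universe; infer_instance

-- ===== CLAIM (what is proved, stated in full; the proofs are below) =====
def Claim_equal_expand_universe : Prop := ∀ (input_text : String) (expansion_factor : Int), Dom_expand_universe input_text expansion_factor → Pre_expand_universe input_text expansion_factor → Spec_expand_universe input_text expansion_factor (expand_universe input_text expansion_factor)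


-- ===== LEMMAS AND PROOFS =====
-- foldl that appends a fixed element once per iteration
theorem duFoldlConst {α γ : Type} (m : List γ) (line : α) (acc : List α) :
    m.foldl (fun a _ => a ++ [line]) acc = acc ++ List.replicate m.length line := by
  induction m generalizing acc with
  | nil => simp
  | cons x xs ih => simp [ih, List.replicate_succ]

-- A's row-expansion loop builds duExpand (max 1 f).toNat
theorem duRowsLoop (f : Int) (lines : List (List Char)) (acc : List (List Char)) :
    lines.foldl (fun acc line =>
      (if line.all (fun c => c == '.') then
          (PySem.List.pyRange 0 (f - 1) 1).foldl (fun a _ => a ++ [line]) acc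
        else acc) ++ [line]) acc
    = acc ++ duExpand (max 1 f).toNat lines := by
  induction lines generalizing acc with
  | nil => simp [duExpand]
  | cons l ls ih =>
    simp only [List.foldl_cons, ih, duExpand, List.flatMap_cons]
    by_cases h : l.all (fun c => c == '.') = true
    · rw [if_pos h, if_pos h, duFoldlConst, PySem.List.length_pyRange_one]
      have : (f - 1 - 0).toNat + 1 = (max 1 f).toNat := by omega
      rw [← this]
      simp [List.replicate_succ', List.append_assoc]
    · rw [if_neg h, if_neg h]
      simp

theorem duMemExpand {n : Nat} {ls : List (List Char)} {row : List Char}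
    (h : row ∈ duExpand n ls) : row ∈ ls := by
  simp only [duExpand, List.mem_flatMap] at h
  obtain ⟨l, hl, hrow⟩ := h
  split at hrow
  · rw [List.eq_of_mem_replicate hrow]; exact hl
  · simp at hrow; rw [hrow]; exact hl

theorem duExpandHead (n : Nat) (hn : 0 < n) (l : List Char) (ls : List (List Char)) :
    (duExpand n (l :: ls)).headD [] = l := by
  obtain ⟨m, rfl⟩ : ∃ m, n = m + 1 := ⟨n - 1, by omega⟩
  simp only [duExpand, List.flatMap_cons]
  split <;> simp [List.replicate_succ]

theorem duExpandGetDZero (n : Nat) (hn : 0 < n) (l : List Char) (ls : List (List Char)) :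
    (duExpand n (l :: ls)).getD 0 [] = l := by
  obtain ⟨m, rfl⟩ : ∃ m, n = m + 1 := ⟨n - 1, by omega⟩
  simp only [duExpand, List.flatMap_cons]
  split <;> simp [List.replicate_succ]

theorem duContains (rows : List (List Char)) (w : Nat)
    (hrect : ∀ l ∈ rows, l.length = w) (c : Nat) (hc : c < w) :
    (((PySem.List.pyRange 0 (w : Int) 1).filter
        (fun c => rows.all (fun line => PySem.List.pyGet? line c == some '.'))).contains (c : Int))
    = rows.all (fun row => row.getD c ' ' == '.') := by
  rw [Bool.eq_iff_iff]
  simp only [List.contains_iff_mem, List.mem_filter, PySem.List.mem_pyRange_one,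
    List.all_eq_true, beq_iff_eq, PySem.List.pyGet?_natCast]
  constructor
  · rintro ⟨-, h⟩ row hrow
    have h2 := h row hrow
    have hlen := hrect row hrow
    rw [List.getElem?_eq_getElem (by omega)] at h2
    rw [List.getD_eq_getElem _ _ (by omega)]
    simpa using h2
  · intro h
    refine ⟨⟨by positivity, by exact_mod_cast hc⟩, fun row hrow => ?_⟩
    have hlen := hrect row hrow
    rw [List.getElem?_eq_getElem (by omega)]
    have h2 := h row hrow
    rw [List.getD_eq_getElem _ _ (by omega)] at h2
    simpa using h2

theorem duIfAppend {γ : Type} (el R rest : List γ) (b : Bool) :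
    (if b then el ++ R else el) ++ rest = el ++ ((if b then R else []) ++ rest) := by
  cases b <;> simp

theorem duColsLoop (rows : List (List Char)) (m : List Int) (acc : List Int) :
    m.foldl (fun acc c =>
        if rows.all (fun line => PySem.List.pyGet? line c == some '.') then acc ++ [c] else acc) acc
    = acc ++ m.filter (fun c => rows.all (fun line => PySem.List.pyGet? line c == some '.')) := by
  simpa using PySem.List.foldl_append_if
    (fun c => rows.all (fun line => PySem.List.pyGet? line c == some '.')) (fun c => c) m acc

-- one output line: A's enumerate loop over row r equals B's transposed-back row r
theorem duLine (rows : List (List Char)) (w : Nat) (f : Int)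
    (hrect : ∀ l ∈ rows, l.length = w) (r : Nat) (hr : r < rows.length) :
    (PySem.List.enumerate rows[r]).foldl (fun el p =>
        (if ((PySem.List.pyRange 0 (w : Int) 1).foldl (fun acc c =>
              if rows.all (fun line => PySem.List.pyGet? line c == some '.') then acc ++ [c]
              else acc) []).contains p.1
          then el ++ List.replicate (f - 1).toNat '.' else el) ++ [p.2]) []
    = (duExpand (max 1 f).toNat
        ((List.range w).map (fun c => rows.map (fun row => row.getD c ' ')))).map
        (fun col => col.getD r ' ') := by
  have hlen : rows[r].length = w := hrect _ (List.getElem_mem hr)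
  simp only [duColsLoop, List.nil_append]
  rw [PySem.List.enumerate_eq_map_pyRange rows[r] ' ']
  rw [show PySem.List.len rows[r] = ((w : Nat) : Int) by simp [hlen]]
  rw [PySem.List.pyRange_zero_natCast]
  simp only [duIfAppend]
  rw [List.map_map, List.foldl_map, PySem.List.foldl_append_eq_flatMap, List.nil_append]
  simp only [duExpand, List.map_flatMap, List.flatMap_map]
  refine List.flatMap_congr (fun c hc => ?_)
  have hcw : c < w := List.mem_range.mp hc
  have hcont := duContains rows w hrect c hcw
  rw [PySem.List.pyRange_zero_natCast] at hcont
  simp only [Function.comp_apply, hcont, PySem.List.pyGetD_natCast]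
  have hmapall : ((List.map (fun row => row.getD c ' ') rows).all fun c => c == '.')
      = (rows.all fun row => row.getD c ' ' == '.') := by
    rw [List.all_map]; rfl
  rw [hmapall]
  have hgetD : (List.map (fun row => row.getD c ' ') rows).getD r ' ' = rows[r].getD c ' ' := by
    rw [List.getD_eq_getElem _ _ (by simpa using hr), List.getElem_map]
  by_cases hb : (rows.all fun row => row.getD c ' ' == '.') = true
  · rw [if_pos hb, if_pos hb, List.map_replicate, hgetD]
    have hdot : rows[r].getD c ' ' = '.' := by
      have := (List.all_eq_true.mp hb) rows[r] (List.getElem_mem hr)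
      simpa using this
    rw [hdot, List.replicate_succ'.symm]
    congr 1
    omega
  · rw [if_neg hb, if_neg hb, List.map_singleton, hgetD, List.nil_append]

-- ===== VERDICT (by name: the statement is the Claim_ definition above) =====
theorem expand_universe_spec : Claim_equal_expand_universe := by
  intro s f _hd hpre
  simp only [Pre_expand_universe] at hpre
  obtain ⟨hne, hrect⟩ := hpre
  unfold Spec_expand_universe
  simp only [expand_universe, expand_universe_alt]
  obtain ⟨l, ls, hL⟩ : ∃ l ls, PySem.Chars.splitlines s.toList = l :: ls := by
    cases h : PySem.Chars.splitlines s.toList with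
    | nil => exact absurd h hne
    | cons a as => exact ⟨a, as, rfl⟩
  rw [hL] at hrect ⊢
  simp only [List.headD_cons] at hrect
  have hkpos : 0 < (max 1 f).toNat := by omega
  rw [duRowsLoop f (l :: ls) []]
  simp only [List.nil_append]
  simp only [PySem.List.pyGetD_zero, duExpandGetDZero _ hkpos, duExpandHead _ hkpos]
  have hrectR : ∀ row ∈ duExpand (max 1 f).toNat (l :: ls), row.length = l.length :=
    fun row h => hrect _ (duMemExpand h)
  simp only [PySem.List.len_eq]
  rw [PySem.List.foldl_append_singleton_eq_map]
  simp only [List.nil_append]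
  have hout : ∀ (o1 o2 : List (List Char)), o1 = o2 →
      String.mk (PySem.Chars.join ['\n'] o1 ++ ['\n']) = String.mk (PySem.Chars.join ['\n'] o2 ++ ['\n']) :=
    fun _ _ h => by rw [h]
  apply hout
  apply List.ext_getElem
  · simp
  · intro i h1 h2
    simp only [List.getElem_map, List.getElem_range]
    exact duLine (duExpand (max 1 f).toNat (l :: ls)) l.length f hrectR i (by simpa using h1)
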